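-- pv_equiv track=rewrite | github.com/BananaMi1k/OperatingSystemsModule | lab session 1.py | getSyntax
-- ===== SOURCE A (Python) =====
-- def getSyntax(inputSentence):
--     #lists
--     person = ['baxter', 'sheila', 'igor']
--     action = ['recognise', 'eat', 'sees', 'pick']
--     position = ['left', 'right', 'forwards', 'backwards']
--     pronoun = ['I', 'you', 'him', 'her']
--     thing = ['screwdriver', 'diamond', 'boat', 'ball', 'person', 'apple', 'dog']
--     value = ['cheap', 'expensive', 'price-less']
--
--     allList = person + action + position + pronoun + thing + value
--
--     inputOrder = inputSentence.split(" ")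
--     syntaxSentence = ""
--
--     #get the syntax of the sentence
--     for word in inputOrder:
--         if word in person:
--             syntaxSentence = syntaxSentence + "person"
--         if word in action:
--             syntaxSentence = syntaxSentence + "action"
--         if word in position:
--             syntaxSentence = syntaxSentence + "position"
--         if word in pronoun:
--             syntaxSentence = syntaxSentence + "pronoun"
--         if word in thing:
--             syntaxSentence = syntaxSentence + "thing"
--         if word in value:
--             syntaxSentence = syntaxSentence + "value"
--         if word not in allList:
--             syntaxSentence = syntaxSentence + "unknown"
--     return syntaxSentence
-- ===== SOURCE B (Python) =====
-- WORDS = ['baxter', 'sheila', 'igor',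
--          'recognise', 'eat', 'sees', 'pick',
--          'left', 'right', 'forwards', 'backwards',
--          'I', 'you', 'him', 'her',
--          'screwdriver', 'diamond', 'boat', 'ball', 'person', 'apple', 'dog',
--          'cheap', 'expensive', 'price-less']
-- LABELS = ['person', 'action', 'position', 'pronoun', 'thing', 'value']
-- STARTS = [0, 3, 7, 11, 15, 22]
--
--
-- def _classify(word):
--     try:
--         i = WORDS.index(word)
--     except ValueError:
--         return 'unknown'
--     return LABELS[sum(1 for s in STARTS if s <= i) - 1]
--
--
-- def getSyntax(inputSentence):
--     out = ''
--     word = ''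
--     for ch in inputSentence + ' ':
--         if ch == ' ':
--             out = out + _classify(word)
--             word = ''
--         else:
--             word = word + ch
--     return out
-- ===== Notes on version B (the rewrite author's own statement) =====
-- stated objective: alternative
-- what changed: Instead of splitting on spaces and running six sequential list-membership ifs per word, B scans the sentence character by character with a (output, current-word) accumulator, flushing each word at a space, and classifies a word by its index in one flat word list converted to a label via start-offset arithmetic.
import Mathlib
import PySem

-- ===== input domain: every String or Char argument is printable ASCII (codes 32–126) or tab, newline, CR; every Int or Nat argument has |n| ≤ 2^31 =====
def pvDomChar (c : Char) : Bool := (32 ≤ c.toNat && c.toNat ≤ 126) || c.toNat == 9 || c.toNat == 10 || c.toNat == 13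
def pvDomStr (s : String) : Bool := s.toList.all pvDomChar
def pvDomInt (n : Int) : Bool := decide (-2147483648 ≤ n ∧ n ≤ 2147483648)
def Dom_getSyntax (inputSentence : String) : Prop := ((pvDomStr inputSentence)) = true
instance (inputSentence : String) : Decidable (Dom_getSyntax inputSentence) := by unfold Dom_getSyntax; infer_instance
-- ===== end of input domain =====

-- B replaces A's split-then-six-membership-ifs pass by a character-level scan that
-- flushes each word at a space and classifies it by its position in one flat word
-- list turned into a label by offset arithmetic (objective: alternative).

set_option maxHeartbeats 1000000

-- ===== PORT A =====
def pvPerson : List String := ["baxter", "sheila", "igor"]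
def pvAction : List String := ["recognise", "eat", "sees", "pick"]
def pvPosition : List String := ["left", "right", "forwards", "backwards"]
def pvPronoun : List String := ["I", "you", "him", "her"]
def pvThing : List String := ["screwdriver", "diamond", "boat", "ball", "person", "apple", "dog"]
def pvValue : List String := ["cheap", "expensive", "price-less"]
def pvAllList : List String := pvPerson ++ pvAction ++ pvPosition ++ pvPronoun ++ pvThing ++ pvValue

def getSyntax (inputSentence : String) : String :=
  -- split(" ") with a non-empty separator never raises: split? is always `some`
  let inputOrder := (PySem.Str.split? inputSentence " ").getD []
  inputOrder.foldl
    (fun syntaxSentence word =>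
      let s1 := if pvPerson.contains word then syntaxSentence ++ "person" else syntaxSentence
      let s2 := if pvAction.contains word then s1 ++ "action" else s1
      let s3 := if pvPosition.contains word then s2 ++ "position" else s2
      let s4 := if pvPronoun.contains word then s3 ++ "pronoun" else s3
      let s5 := if pvThing.contains word then s4 ++ "thing" else s4
      let s6 := if pvValue.contains word then s5 ++ "value" else s5
      if ¬ pvAllList.contains word then s6 ++ "unknown" else s6)
    ""

-- ===== PORT B =====
def pvWords : List String :=
  ["baxter", "sheila", "igor",
   "recognise", "eat", "sees", "pick",
   "left", "right", "forwards", "backwards",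
   "I", "you", "him", "her",
   "screwdriver", "diamond", "boat", "ball", "person", "apple", "dog",
   "cheap", "expensive", "price-less"]
def pvLabels : List String := ["person", "action", "position", "pronoun", "thing", "value"]
def pvStarts : List Int := [0, 3, 7, 11, 15, 22]

-- Source B's _classify: try WORDS.index(word) / except → match on index?;
-- LABELS[…] via pyGet?; the index is always in 0..5 (count ≥ 1 since STARTS[0]=0 ≤ i),
-- so the `.getD ""` (IndexError branch) is never taken.
def pvClassify (word : String) : String :=
  match PySem.List.index? pvWords word with
  | none => "unknown"
  | some i =>
      (PySem.List.pyGet? pvLabels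
        ((pvStarts.countP (fun s => decide (s ≤ (i : Int))) : Int) - 1)).getD ""

def getSyntax_alt (inputSentence : String) : String :=
  ((inputSentence ++ " ").toList.foldl
    (fun (st : String × String) ch =>
      if ch = ' ' then (st.1 ++ pvClassify st.2, "") else (st.1, st.2.push ch))
    ("", "")).1

-- ===== PRECONDITION & SPEC =====
def Spec_getSyntax (inputSentence : String) (out : String) : Prop := out = getSyntax_alt inputSentence
instance (inputSentence : String) (out : String) : Decidable (Spec_getSyntax inputSentence out) := by unfold Spec_getSyntax; infer_instance

-- ===== CLAIM (what is proved, stated in full; the proofs are below) =====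
def Claim_equal_getSyntax : Prop := ∀ (inputSentence : String), Dom_getSyntax inputSentence → Spec_getSyntax inputSentence (getSyntax inputSentence)

-- ===== LEMMAS AND PROOFS =====

-- the label A's six-if chain appends for a single word
def pvLabelA (word : String) : String :=
  let s1 := if pvPerson.contains word then "person" else ""
  let s2 := if pvAction.contains word then s1 ++ "action" else s1
  let s3 := if pvPosition.contains word then s2 ++ "position" else s2
  let s4 := if pvPronoun.contains word then s3 ++ "pronoun" else s3
  let s5 := if pvThing.contains word then s4 ++ "thing" else s4
  let s6 := if pvValue.contains word then s5 ++ "value" else s5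
  if ¬ pvAllList.contains word then s6 ++ "unknown" else s6

theorem pv_join_cons (x : String) (xs : List String) :
    PySem.Str.join "" (x :: xs) = x ++ PySem.Str.join "" xs := by
  cases xs with
  | nil => simp [PySem.Str.join, PySem.Chars.join, List.intercalate]
  | cons y ys => simp [PySem.Str.join, PySem.Chars.join_cons_cons]

theorem pv_join_nil : PySem.Str.join "" ([] : List String) = "" := by
  simp [PySem.Str.join, PySem.Chars.join, List.intercalate]

theorem pv_stepA_eq (acc w : String) :
    (let s1 := if pvPerson.contains w then acc ++ "person" else acc
     let s2 := if pvAction.contains w then s1 ++ "action" else s1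
     let s3 := if pvPosition.contains w then s2 ++ "position" else s2
     let s4 := if pvPronoun.contains w then s3 ++ "pronoun" else s3
     let s5 := if pvThing.contains w then s4 ++ "thing" else s4
     let s6 := if pvValue.contains w then s5 ++ "value" else s5
     if ¬ pvAllList.contains w then s6 ++ "unknown" else s6)
    = acc ++ pvLabelA w := by
  simp only [pvLabelA]
  split_ifs <;> simp_all [String.append_assoc]

theorem pv_foldA_eq (ws : List String) (acc : String) :
    ws.foldl
      (fun syntaxSentence word =>
        let s1 := if pvPerson.contains word then syntaxSentence ++ "person" else syntaxSentence
        let s2 := if pvAction.contains word then s1 ++ "action" else s1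
        let s3 := if pvPosition.contains word then s2 ++ "position" else s2
        let s4 := if pvPronoun.contains word then s3 ++ "pronoun" else s3
        let s5 := if pvThing.contains word then s4 ++ "thing" else s4
        let s6 := if pvValue.contains word then s5 ++ "value" else s5
        if ¬ pvAllList.contains word then s6 ++ "unknown" else s6) acc
    = acc ++ PySem.Str.join "" (ws.map pvLabelA) := by
  induction ws generalizing acc with
  | nil => simp [pv_join_nil]
  | cons w ws ih =>
      simp only [List.foldl_cons, List.map_cons, pv_join_cons]
      rw [pv_stepA_eq, ih, String.append_assoc]

-- per-word agreement of the two classifications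
theorem pv_classify_eq (w : String) : pvLabelA w = pvClassify w := by
  by_cases hw : w ∈ pvWords
  · have hall : pvWords.all (fun w => pvLabelA w == pvClassify w) = true := by decide
    rw [List.all_eq_true] at hall
    exact eq_of_beq (hall w hw)
  · have hnone : List.idxOf? w pvWords = none := List.idxOf?_eq_none_iff.mpr hw
    have hA : w ∉ pvAllList := by
      have : pvAllList = pvWords := by decide
      rw [this]; exact hw
    have h1 : w ∉ pvPerson := fun h => hA (by simp only [pvAllList, List.mem_append]; tauto)
    have h2 : w ∉ pvAction := fun h => hA (by simp only [pvAllList, List.mem_append]; tauto)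
    have h3 : w ∉ pvPosition := fun h => hA (by simp only [pvAllList, List.mem_append]; tauto)
    have h4 : w ∉ pvPronoun := fun h => hA (by simp only [pvAllList, List.mem_append]; tauto)
    have h5 : w ∉ pvThing := fun h => hA (by simp only [pvAllList, List.mem_append]; tauto)
    have h6 : w ∉ pvValue := fun h => hA (by simp only [pvAllList, List.mem_append]; tauto)
    simp [pvLabelA, pvClassify, hnone, h1, h2, h3, h4, h5, h6, hA]

theorem pv_push (w : List Char) (c : Char) : (String.ofList w).push c = String.ofList (w ++ [c]) := by
  have h := String.toList_push (s := String.ofList w) c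
  rw [String.toList_ofList] at h
  calc (String.ofList w).push c
      = String.ofList ((String.ofList w).push c).toList := Eq.symm String.ofList_toList
    _ = String.ofList (w ++ [c]) := by rw [h]

-- structural single-space splitter mirroring B's scan
def pvSplitSp : List Char → List Char → List (List Char)
  | [], pre => [pre]
  | c :: rest, pre => if c = ' ' then pre :: pvSplitSp rest [] else pvSplitSp rest (pre ++ [c])

theorem pv_go_eq (fuel : Nat) (l cur : List Char) (acc : List (List Char))
    (h : l.length < fuel) :
    PySem.Chars.splitOn.go [' '] fuel l cur acc = acc.reverse ++ pvSplitSp l cur.reverse := by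
  induction fuel generalizing l cur acc with
  | zero => omega
  | succ fuel ih =>
      cases l with
      | nil => simp [PySem.Chars.splitOn.go, pvSplitSp]
      | cons c rest =>
          by_cases hc : c = ' '
          · subst hc
            rw [PySem.Chars.splitOn.go]
            have hp : [' '].isPrefixOf (' ' :: rest) = true := by simp [List.isPrefixOf]
            simp only [hp, if_true]
            have hd : List.drop [' '].length (' ' :: rest) = rest := by simp
            rw [hd, ih rest [] (cur.reverse :: acc) (by simp at h ⊢; omega)]
            simp [pvSplitSp]
          · rw [PySem.Chars.splitOn.go]
            have hp : [' '].isPrefixOf (c :: rest) = false := by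
              simp only [List.isPrefixOf, Bool.and_eq_false_iff, beq_eq_false_iff_ne, ne_eq]
              exact Or.inl fun h => hc h.symm
            simp only [hp, Bool.false_eq_true, if_false]
            rw [ih rest (c :: cur) acc (by simp at h ⊢; omega)]
            simp [pvSplitSp, hc]

theorem pv_splitOn_eq (l : List Char) :
    PySem.Chars.splitOn l [' '] = pvSplitSp l [] := by
  have := pv_go_eq (l.length + 1) l [] [] (by omega)
  simpa [PySem.Chars.splitOn] using this

theorem pv_foldB_eq (cs : List Char) (out : String) (w : List Char) :
    ((cs ++ [' ']).foldl
      (fun (st : String × String) ch =>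
        if ch = ' ' then (st.1 ++ pvClassify st.2, "") else (st.1, st.2.push ch))
      (out, String.ofList w)).1
    = out ++ PySem.Str.join "" ((pvSplitSp cs w).map (fun p => pvClassify (String.ofList p))) := by
  induction cs generalizing out w with
  | nil => simp [pvSplitSp, pv_join_cons, pv_join_nil]
  | cons c cs ih =>
      by_cases hc : c = ' '
      · subst hc
        simp only [List.cons_append, List.foldl_cons, if_true]
        have h2 := ih (out ++ pvClassify (String.ofList w)) []
        simp only [pvSplitSp, if_true, List.map_cons, pv_join_cons]
        rw [← String.append_assoc]
        exact h2
      · simp only [List.cons_append, List.foldl_cons, hc, if_false]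
        rw [pv_push, ih]
        simp [pvSplitSp, hc]

-- ===== VERDICT (by name: the statement is the Claim_ definition above) =====
theorem getSyntax_spec : Claim_equal_getSyntax := by
  intro s _
  show getSyntax s = getSyntax_alt s
  have hsplit : PySem.Str.split? s " " =
      some ((PySem.Chars.splitOn s.toList [' ']).map String.ofList) := by
    simp [PySem.Str.split?, PySem.Chars.split?]
  simp only [getSyntax, getSyntax_alt, hsplit, Option.getD_some]
  rw [pv_foldA_eq]
  have htl : (s ++ " ").toList = s.toList ++ [' '] := by simp
  rw [htl]
  have h0 : ("" : String) = String.ofList [] := rfl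
  conv_rhs => rw [h0]
  rw [pv_foldB_eq, pv_splitOn_eq]
  simp only [List.map_map]
  have hm : List.map (pvLabelA ∘ String.ofList) (pvSplitSp s.toList [])
      = List.map (fun p => pvClassify (String.ofList p)) (pvSplitSp s.toList []) :=
    List.map_congr_left (fun p _ => by simp [Function.comp, pv_classify_eq])
  rw [hm]
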